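-- pv_equiv track=rewrite | github.com/GOUTHAM-2002/Artificial-Intelligence | dendral.py | filter_valid_structures
-- ===== SOURCE A (Python) =====
-- chemical_rules = {
--     "C": {
--         "valency": 4,
--         "color": "#333333",  # Dark gray for Carbon
--         "size": 1000
--     },
--     "H": {
--         "valency": 1,
--         "color": "#0088FF",  # Blue for Hydrogen
--         "size": 700
--     },
--     "O": {
--         "valency": 2,
--         "color": "#FF0000",  # Red for Oxygen
--         "size": 900
--     },
--     "N": {
--         "valency": 3,
--         "color": "#00FF00",  # Green for Nitrogen
--         "size": 900
--     }
-- }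
--
-- def filter_valid_structures(structures):
--     """Filter structures based on chemical rules"""
--     valid_structures = []
--     for structure in structures:
--         atoms = structure.split("-")
--         atom_counts = {atom: atoms.count(atom) for atom in set(atoms)}
--
--         # Enhanced validation with proper chemical rules
--         total_valency = sum(atom_counts[atom] * chemical_rules[atom]["valency"]
--                            for atom in atom_counts if atom in chemical_rules)
--
--         if total_valency % 2 == 0:  # Valid molecules have even total valency
--             valid_structures.append(structure)
--
--     return valid_structures
-- ===== SOURCE B (Python) =====
-- chemical_rules = {
--     "C": {"valency": 4, "color": "#333333", "size": 1000},
--     "H": {"valency": 1, "color": "#0088FF", "size": 700},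
--     "O": {"valency": 2, "color": "#FF0000", "size": 900},
--     "N": {"valency": 3, "color": "#00FF00", "size": 900},
-- }
--
--
-- def filter_valid_structures(structures):
--     """Filter structures based on chemical rules (parity of odd-valency atoms)."""
--     odd_atoms = {atom for atom, rules in chemical_rules.items()
--                  if rules["valency"] % 2 == 1}
--     return [structure for structure in structures
--             if sum(1 for token in structure.split("-") if token in odd_atoms) % 2 == 0]
-- ===== Notes on version B (the rewrite author's own statement) =====
-- stated objective: simpler
-- what changed: B drops A's per-structure count dictionary and weighted valency sum entirely: it derives the set of odd-valency atoms from chemical_rules once and keeps a structure iff the number of its tokens lying in that set is even (a parity argument replacing the weighted summation).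
import Mathlib
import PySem

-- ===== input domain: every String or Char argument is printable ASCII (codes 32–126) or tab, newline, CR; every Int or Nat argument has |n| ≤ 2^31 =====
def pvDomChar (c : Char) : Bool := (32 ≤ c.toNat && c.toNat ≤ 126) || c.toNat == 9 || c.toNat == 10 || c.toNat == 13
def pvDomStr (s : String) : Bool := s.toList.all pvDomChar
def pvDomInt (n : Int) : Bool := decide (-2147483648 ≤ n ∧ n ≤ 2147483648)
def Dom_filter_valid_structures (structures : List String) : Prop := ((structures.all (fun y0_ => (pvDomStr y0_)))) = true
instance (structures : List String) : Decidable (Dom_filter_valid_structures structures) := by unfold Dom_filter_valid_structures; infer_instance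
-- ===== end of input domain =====

-- B replaces A's weighted valency summation over per-atom counts by counting odd-valency
-- tokens and testing that count's parity (objective: simpler; same asymptotic cost).


-- ===== PORT A =====
-- module constant: each value dict {"valency": _, "color": _, "size": _} is the fixed
-- literal record, modelled as the tuple (valency, color, size); ["valency"] is `.1`.
def chemical_rules : PySem.Dict String (Int × String × Int) :=
  PySem.Dict.ofList
    [("C", (4, "#333333", 1000)), ("H", (1, "#0088FF", 700)),
     ("O", (2, "#FF0000", 900)), ("N", (3, "#00FF00", 900))]

-- the loop-body test of A: build atom_counts = {atom: atoms.count(atom) for atom in set(atoms)},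
-- then sum count*valency over the dict's keys for atoms present in chemical_rules, test evenness.
-- (The Python comprehension iterates set(atoms) in hash order; only the order-independent SUM
-- over the resulting dict is used, so iterating the PySem.Set's order is exact.)
def pyA_keep (struc : String) : Bool :=
  let atoms := (PySem.Str.split? struc "-").getD []  -- split? is none only for sep=""; sep is "-", so exact
  let atom_counts : PySem.Dict String Int :=
    (PySem.Set.ofList atoms).foldl
      (fun d atom => d.insert atom ((PySem.List.count atoms atom : Int))) PySem.Dict.empty
  let total_valency : Int :=
    atom_counts.keys.foldl
      (fun acc atom =>
        if chemical_rules.contains atom then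
          acc + atom_counts.getD atom 0 * (chemical_rules.getD atom (0, "", 0)).1
        else acc) 0
  PySem.Int.mod total_valency 2 == 0

def filter_valid_structures (structures : List String) : List String :=
  structures.foldl
    (fun valid_structures struc =>
      if pyA_keep struc then valid_structures ++ [struc] else valid_structures) []

-- ===== PORT B =====
-- odd_atoms = {atom for atom, rules in chemical_rules.items() if rules["valency"] % 2 == 1}
def pyB_odd_atoms : PySem.Set String :=
  PySem.Set.ofList
    ((chemical_rules.items.filter (fun p => PySem.Int.mod p.2.1 2 == 1)).map (fun p => p.1))

-- sum(1 for token in struc.split("-") if token in odd_atoms) % 2 == 0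
def pyB_keep (struc : String) : Bool :=
  PySem.Int.mod
    (((PySem.Str.split? struc "-").getD []).foldl
      (fun acc token => if PySem.Set.contains pyB_odd_atoms token then acc + 1 else acc)
      (0 : Int)) 2 == 0

def filter_valid_structures_alt (structures : List String) : List String :=
  structures.filter pyB_keep

-- ===== PRECONDITION & SPEC =====
def Spec_filter_valid_structures (structures : List String) (out : List String) : Prop := out = filter_valid_structures_alt structures
instance (structures : List String) (out : List String) : Decidable (Spec_filter_valid_structures structures out) := by unfold Spec_filter_valid_structures; infer_instance

-- ===== CLAIM (what is proved, stated in full; the proofs are below) =====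
def Claim_equal_filter_valid_structures : Prop := ∀ (structures : List String), Dom_filter_valid_structures structures → Spec_filter_valid_structures structures (filter_valid_structures structures)

-- ===== LEMMAS AND PROOFS =====

-- getD of a fold-of-inserts whose values do not depend on the dict
lemma getD_foldl_insert_fn (l : List String) (f : String → Int)
    (d : PySem.Dict String Int) (a : String) :
    (l.foldl (fun d x => d.insert x (f x)) d).getD a 0
      = if a ∈ l then f a else d.getD a 0 := by
  induction l generalizing d with
  | nil => simp
  | cons x xs ih =>
      simp only [List.foldl_cons, ih, List.mem_cons]
      by_cases hx : a ∈ xs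
      · simp [hx]
      · by_cases hax : a = x
        · subst hax; simp [hx]
        · simp [hx, hax, PySem.Dict.getD_insert]

-- Σ_{a ∈ D} (if a = t then h a else 0) = h t for nodup D containing t
lemma sum_map_ite_single (D : List String) (hD : D.Nodup) (t : String) (ht : t ∈ D)
    (h : String → Int) :
    (D.map (fun a => if a = t then h a else 0)).sum = h t := by
  induction D with
  | nil => cases ht
  | cons x xs ih =>
      rcases List.nodup_cons.mp hD with ⟨hx, hxs⟩
      rcases List.mem_cons.mp ht with rfl | hmem
      · have hz : ∀ a ∈ xs, (if a = t then h a else 0) = 0 := by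
          intro a ha
          have : a ≠ t := fun e => hx (e ▸ ha)
          simp [this]
        simp [List.map_congr_left hz]
      · have hxt : x ≠ t := fun e => hx (e ▸ hmem)
        simp [hxt, ih hxs hmem]

-- Σ over the distinct atoms of count*h = Σ over the tokens of h
lemma sum_count_mul (D : List String) (hD : D.Nodup) (L : List String)
    (hsub : ∀ t ∈ L, t ∈ D) (h : String → Int) :
    (D.map (fun a => (L.count a : Int) * h a)).sum = (L.map h).sum := by
  induction L with
  | nil => simp
  | cons t L' ih =>
      have ht : t ∈ D := hsub t (List.mem_cons_self ..)
      have hsub' : ∀ x ∈ L', x ∈ D := fun x hx => hsub x (List.mem_cons_of_mem t hx)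
      have hmap : ∀ a ∈ D, ((t :: L').count a : Int) * h a
          = (L'.count a : Int) * h a + (if a = t then h a else 0) := by
        intro a _
        by_cases hat : a = t
        · subst hat
          simp only [List.count_cons_self]
          push_cast
          ring
        · simp only [List.count_cons, if_neg (fun e : a = t => hat e)]
          simp only [beq_iff_eq, if_neg (fun e : t = a => hat (Eq.symm e)), add_zero]
      rw [List.map_congr_left hmap, PySem.List.sum_map_add_int, ih hsub',
        sum_map_ite_single D hD t ht h]
      simp [add_comm]

-- per-token valency mod 2 is the odd-atoms indicator
lemma valency_mod_two (t : String) :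
    (if chemical_rules.contains t then (chemical_rules.getD t (0, "", 0)).1 else 0) % 2
      = if PySem.Set.contains pyB_odd_atoms t then 1 else 0 := by
  have hodd : pyB_odd_atoms = ["H", "N"] := by decide
  rw [hodd]
  by_cases h1 : t = "C"
  · subst h1; decide
  by_cases h2 : t = "H"
  · subst h2; decide
  by_cases h3 : t = "O"
  · subst h3; decide
  by_cases h4 : t = "N"
  · subst h4; decide
  have hc : chemical_rules.contains t = false := by
    have hmk : chemical_rules = PySem.Dict.mk
        [("C", (4, "#333333", 1000)), ("H", (1, "#0088FF", 700)),
         ("O", (2, "#FF0000", 900)), ("N", (3, "#00FF00", 900))] := by decide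
    rw [hmk]
    simp only [PySem.Dict.contains_mk, List.any_cons, List.any_nil, Bool.or_false,
      Bool.or_eq_false_iff, beq_eq_false_iff_ne, ne_eq]
    exact ⟨Ne.symm h1, Ne.symm h2, Ne.symm h3, Ne.symm h4⟩
  simp [hc]
  exact ⟨h2, h4⟩

-- parity of a mapped sum is the parity of the count of odd contributors
lemma sum_parity (L : List String) (h : String → Int) (p : String → Bool)
    (hp : ∀ t, h t % 2 = if p t then 1 else 0) :
    (L.map h).sum % 2 = (L.countP p : Int) % 2 := by
  induction L with
  | nil => simp
  | cons x xs ih =>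
      simp only [List.map_cons, List.sum_cons, List.countP_cons]
      have := hp x
      by_cases hx : p x <;> simp [hx] at this ⊢ <;> omega

lemma keep_eq (s : String) : pyA_keep s = pyB_keep s := by
  simp only [pyA_keep, pyB_keep]
  generalize (PySem.Str.split? s "-").getD [] = L
  rw [PySem.Dict.keys_foldl_insert]
  have hkeys : PySem.Set.update (PySem.Dict.empty : PySem.Dict String Int).keys
      (PySem.Set.ofList L) = PySem.Set.ofList L := by
    rw [show (PySem.Dict.empty : PySem.Dict String Int).keys = [] from rfl,
      PySem.Set.update_nil_left, PySem.Set.ofList_ofList]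
  rw [hkeys]
  have hbody : ∀ (acc : Int), ∀ a ∈ PySem.Set.ofList L,
      (if chemical_rules.contains a then
          acc + ((PySem.Set.ofList L).foldl
              (fun d atom => d.insert atom ((PySem.List.count L atom : Int)))
              PySem.Dict.empty).getD a 0 * (chemical_rules.getD a (0, "", 0)).1
        else acc)
      = acc + (L.count a : Int) *
          (if chemical_rules.contains a then (chemical_rules.getD a (0, "", 0)).1 else 0) := by
    intro acc a ha
    rw [getD_foldl_insert_fn, if_pos ha, PySem.List.count_eq]
    by_cases hcon : chemical_rules.contains a <;> simp [hcon]
  rw [PySem.List.foldl_congr_mem _ _ _ _ hbody, PySem.List.foldl_add,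
    sum_count_mul _ (PySem.Set.nodup_ofList L) L
      (fun t ht => (PySem.Set.mem_ofList L t).mpr ht),
    PySem.List.foldl_if_add_one, zero_add, zero_add,
    PySem.Int.mod_eq_emod_of_pos (by norm_num),
    PySem.Int.mod_eq_emod_of_pos (by norm_num),
    sum_parity L _ _ valency_mod_two]

-- ===== VERDICT (by name: the statement is the Claim_ definition above) =====
theorem filter_valid_structures_spec : Claim_equal_filter_valid_structures := by
  intro structures _
  unfold Spec_filter_valid_structures filter_valid_structures filter_valid_structures_alt
  rw [PySem.List.foldl_append_if_eq_filter]
  simp [List.filter_congr (fun s _ => keep_eq s)]
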